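-- pv_equiv track=rewrite | github.com/mahaloz/cfgutils | cfgutils/angr_utils/prettyify_ail.py | filter_string_for_display
-- ===== SOURCE A (Python) =====
-- def is_printable(ch):
--     return 32 <= ch < 127
--
-- def filter_string_for_display(s):
--     output = ""
--     for ch in s.replace("\r", "\\r").replace("\n", "\\n").replace("\t", "\\t"):
--         char = ord(ch)
--         if not is_printable(char):
--             ch = "\\x%0.2x" % char
--         output += ch
--     return output
-- ===== SOURCE B (Python) =====
-- _ESCAPES = {"\r": "\\r", "\n": "\\n", "\t": "\\t"}
--
-- def filter_string_for_display(s):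
--     pieces = []
--     for ch in s:
--         if ch in _ESCAPES:
--             pieces.append(_ESCAPES[ch])
--         elif 32 <= ord(ch) < 127:
--             pieces.append(ch)
--         else:
--             pieces.append("\\x%0.2x" % ord(ch))
--     return "".join(pieces)
-- ===== Notes on version B (the rewrite author's own statement) =====
-- stated objective: simpler
-- what changed: Single pass over the input with a small escape dict and a join of collected pieces, instead of three chained .replace() preprocessing passes followed by a per-character scan with string concatenation.
import Mathlib
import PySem

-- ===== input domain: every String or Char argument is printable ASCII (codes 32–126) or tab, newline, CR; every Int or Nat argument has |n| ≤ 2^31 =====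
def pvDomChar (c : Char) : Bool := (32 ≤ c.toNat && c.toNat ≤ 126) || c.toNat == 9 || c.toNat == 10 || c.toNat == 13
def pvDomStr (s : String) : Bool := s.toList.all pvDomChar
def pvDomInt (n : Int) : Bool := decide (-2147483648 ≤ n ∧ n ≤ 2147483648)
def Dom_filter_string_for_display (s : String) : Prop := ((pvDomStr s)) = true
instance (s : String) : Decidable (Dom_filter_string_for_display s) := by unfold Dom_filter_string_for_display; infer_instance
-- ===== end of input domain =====

-- B replaces A's three chained .replace() preprocessing passes + per-char scan with
-- a single pass using a small escape dict and ''.join of collected pieces (objective: simpler).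


-- ===== PORT A =====
-- helper is_printable from the module
def fsd_is_printable (ch : Int) : Bool := decide (32 ≤ ch ∧ ch < 127)

-- "%x" hex digits of a nonnegative number (lowercase), hand-ported (exact for n ≥ 0)
def fsd_hexDigit (n : Nat) : Char := if n < 10 then Char.ofNat (48 + n) else Char.ofNat (87 + n)

def fsd_hexDigits (n : Nat) : List Char :=
  if _h : n < 16 then [fsd_hexDigit n]
  else fsd_hexDigits (n / 16) ++ [fsd_hexDigit (n % 16)]
decreasing_by exact Nat.div_lt_self (by omega) (by omega)

-- "\\x%0.2x" % ch : '\x' then the hex digits zero-padded to width 2 (exact for ch ≥ 0, which ord guarantees)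
def fsd_escHex (ch : Int) : List Char :=
  let ds := fsd_hexDigits ch.toNat
  '\\' :: 'x' :: (if ds.length < 2 then '0' :: ds else ds)

def filter_string_for_display (s : String) : String :=
  let t := PySem.Str.replace (PySem.Str.replace (PySem.Str.replace s "\r" "\\r") "\n" "\\n") "\t" "\\t"
  String.ofList (t.toList.foldl (fun output ch =>
    let char : Int := (ch.toNat : Int)
    let chs : List Char := if ¬ fsd_is_printable char then fsd_escHex char else [ch]
    output ++ chs) [])

-- ===== PORT B =====
-- the module-level _ESCAPES dict of Source B
def fsd_escapes : PySem.Dict Char (List Char) :=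
  ((PySem.Dict.empty.insert '\r' ['\\', 'r']).insert '\n' ['\\', 'n']).insert '\t' ['\\', 't']

def filter_string_for_display_alt (s : String) : String :=
  String.ofList (PySem.Chars.join [] (s.toList.map (fun ch =>
    if fsd_escapes.contains ch then (fsd_escapes.get? ch).getD []
    else if decide (32 ≤ (ch.toNat : Int) ∧ (ch.toNat : Int) < 127) then [ch]
    else fsd_escHex (ch.toNat : Int))))

-- ===== PRECONDITION & SPEC =====
def Spec_filter_string_for_display (s : String) (out : String) : Prop := out = filter_string_for_display_alt s
instance (s : String) (out : String) : Decidable (Spec_filter_string_for_display s out) := by unfold Spec_filter_string_for_display; infer_instance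

-- ===== CLAIM (what is proved, stated in full; the proofs are below) =====
def Claim_equal_filter_string_for_display : Prop := ∀ (s : String), Dom_filter_string_for_display s → Spec_filter_string_for_display s (filter_string_for_display s)

-- ===== LEMMAS AND PROOFS =====

-- a one-character .replace is a per-character flatMap
lemma fsd_replace_go_single (o : Char) (rep : List Char) :
    ∀ (cs acc : List Char) (fuel : Nat), cs.length ≤ fuel →
      PySem.Chars.replace.go [o] rep fuel cs acc
        = acc.reverse ++ cs.flatMap (fun c => if c = o then rep else [c]) := by
  intro cs
  induction cs with
  | nil =>
      intro acc fuel _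
      cases fuel <;> simp [PySem.Chars.replace.go]
  | cons c t ih =>
      intro acc fuel hf
      cases fuel with
      | zero => simp at hf
      | succ n =>
          have ht : t.length ≤ n := by simpa using hf
          by_cases hco : c = o
          · subst hco
            simp [PySem.Chars.replace.go, List.isPrefixOf, ih _ n ht]
          · have : (o == c) = false := by simp; exact fun h => hco h.symm
            simp [PySem.Chars.replace.go, List.isPrefixOf, this, ih _ n ht, hco]

lemma fsd_replace_single (o : Char) (rep cs : List Char) :
    PySem.Chars.replace cs [o] rep = cs.flatMap (fun c => if c = o then rep else [c]) := by
  simpa using fsd_replace_go_single o rep cs [] cs.length le_rfl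

lemma fsd_join_nil_sep (ps : List (List Char)) : PySem.Chars.join [] ps = ps.flatten := by
  simp [PySem.Chars.join, List.intercalate]
  induction ps with
  | nil => simp
  | cons p ps ih =>
      cases ps with
      | nil => simp
      | cons q qs => simpa [List.intersperse] using ih

-- proof-side abbreviations for the per-character maps
def fsd_r (o : Char) (rep : List Char) (c : Char) : List Char := if c = o then rep else [c]

def fsd_fA (c : Char) : List Char :=
  if ¬ fsd_is_printable ((c.toNat : Int)) then fsd_escHex ((c.toNat : Int)) else [c]

def fsd_fB (c : Char) : List Char :=
  if fsd_escapes.contains c then (fsd_escapes.get? c).getD []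
  else if decide (32 ≤ (c.toNat : Int) ∧ (c.toNat : Int) < 127) then [c]
  else fsd_escHex ((c.toNat : Int))

-- the per-character piece both programs compute
lemma fsd_perchar (c : Char) :
    List.flatMap (fun x => List.flatMap (fun y => List.flatMap fsd_fA (fsd_r '\t' ['\\', 't'] y)) (fsd_r '\n' ['\\', 'n'] x)) (fsd_r '\r' ['\\', 'r'] c)
      = fsd_fB c := by
  by_cases h1 : c = '\r'
  · subst h1; decide
  · by_cases h2 : c = '\n'
    · subst h2; decide
    · by_cases h3 : c = '\t'
      · subst h3; decide
      · have hc : fsd_escapes.contains c = false := by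
          simp [fsd_escapes, PySem.Dict.contains, PySem.Dict.empty, PySem.Dict.insert]
          exact ⟨fun h => h1 h.symm, fun h => h2 h.symm, fun h => h3 h.symm⟩
        simp [fsd_r, fsd_fA, fsd_fB, h1, h2, h3, hc, fsd_is_printable]
        split_ifs with ha hb <;> first | rfl | omega

theorem fsd_main (s : String) :
    filter_string_for_display s = filter_string_for_display_alt s := by
  unfold filter_string_for_display filter_string_for_display_alt
  have e1 : ("\r" : String).toList = ['\r'] := rfl
  have e2 : ("\n" : String).toList = ['\n'] := rfl
  have e3 : ("\t" : String).toList = ['\t'] := rfl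
  have e4 : ("\\r" : String).toList = ['\\', 'r'] := rfl
  have e5 : ("\\n" : String).toList = ['\\', 'n'] := rfl
  have e6 : ("\\t" : String).toList = ['\\', 't'] := rfl
  simp only [PySem.Str.toList_replace, e1, e2, e3, e4, e5, e6,
             fsd_replace_single, fsd_join_nil_sep]
  rw [PySem.List.foldl_append_eq_flatMap
        (fun ch => if ¬ fsd_is_printable ((ch.toNat : Int)) then fsd_escHex ((ch.toNat : Int)) else [ch])]
  have hA : (fun ch => if ¬ fsd_is_printable ((ch.toNat : Int)) then fsd_escHex ((ch.toNat : Int)) else [ch]) = fsd_fA := rfl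
  have hr : ∀ o rep, (fun c => if c = o then rep else [c]) = fsd_r o rep := fun _ _ => rfl
  simp only [List.nil_append, hA, hr]
  rw [List.flatMap_assoc, List.flatMap_assoc, List.flatMap_assoc]
  have hB : (fun ch => if fsd_escapes.contains ch = true then (fsd_escapes.get? ch).getD []
      else if decide (32 ≤ (ch.toNat : Int) ∧ (ch.toNat : Int) < 127) = true then [ch]
      else fsd_escHex ((ch.toNat : Int))) = fsd_fB := rfl
  simp only [fsd_perchar, hB, ← List.flatMap_def]

-- ===== VERDICT (by name: the statement is the Claim_ definition above) =====
theorem filter_string_for_display_spec : Claim_equal_filter_string_for_display := by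
  intro s _
  unfold Spec_filter_string_for_display
  exact fsd_main s
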